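-- pv_equiv track=rewrite | github.com/dorian68/TradingStrat_mean_reversion | scenarios.py | _segment_labels
-- ===== SOURCE A (Python) =====
-- from typing import Iterable, List
--
-- def _segment_labels(labels: Iterable[str]) -> List[int]:
--     seg = []
--     current = 0
--     prev = None
--     for label in labels:
--         if label != prev:
--             current += 1
--         seg.append(current)
--         prev = label
--     return seg
-- ===== SOURCE B (Python) =====
-- from itertools import accumulate
-- from typing import Iterable, List
--
-- def _segment_labels(labels: Iterable[str]) -> List[int]:
--     labels = list(labels)
--     if not labels:
--         return []
--     changes = [1] + [int(a != b) for a, b in zip(labels[1:], labels)]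
--     return list(accumulate(changes))
-- ===== Notes on version B (the rewrite author's own statement) =====
-- stated objective: alternative
-- what changed: B is two staged passes: it first materialises a 0/1 change-indicator vector by zipping the list with its shifted self, then takes its running prefix sum with itertools.accumulate, instead of A's single stateful loop carrying a prev label and a counter.
import Mathlib
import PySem

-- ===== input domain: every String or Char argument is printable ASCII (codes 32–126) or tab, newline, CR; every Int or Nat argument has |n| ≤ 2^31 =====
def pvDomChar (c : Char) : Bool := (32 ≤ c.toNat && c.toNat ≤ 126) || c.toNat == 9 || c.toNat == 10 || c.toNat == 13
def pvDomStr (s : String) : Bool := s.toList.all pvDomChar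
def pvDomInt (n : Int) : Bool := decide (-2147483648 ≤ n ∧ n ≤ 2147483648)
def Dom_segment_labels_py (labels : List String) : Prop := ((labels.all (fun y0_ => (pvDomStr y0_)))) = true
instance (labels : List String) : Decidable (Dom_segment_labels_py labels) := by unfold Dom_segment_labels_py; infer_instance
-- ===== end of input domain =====

-- B replaces A's single stateful loop (prev label + counter) by two staged passes:
-- a 0/1 change-indicator vector (zip with the shifted list) followed by its prefix sum; objective: alternative.

-- ===== PORT A =====
-- state of A's loop: current counter and prev label
def segALoop (labels : List String) (current : Int) (prev : Option String) : List Int :=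
  match labels with
  | [] => []
  | l :: rest =>
    let current' := if some l ≠ prev then current + 1 else current
    current' :: segALoop rest current' (some l)

def segment_labels_py (labels : List String) : List Int :=
  segALoop labels 0 none

-- ===== PORT B =====
-- itertools.accumulate: running prefix sums, starting from acc
def accumB (acc : Int) : List Int → List Int
  | [] => []
  | x :: xs => (acc + x) :: accumB (acc + x) xs

def segment_labels_py_alt (labels : List String) : List Int :=
  match labels with
  | [] => []
  | x :: xs =>
    -- changes = [1] + [int(a != b) for a, b in zip(labels[1:], labels)]
    let changes : List Int :=
      1 :: List.zipWith (fun a b => if a ≠ b then (1 : Int) else 0) xs (x :: xs)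
    accumB 0 changes

-- ===== PRECONDITION & SPEC =====
def Spec_segment_labels_py (labels : List String) (out : List Int) : Prop := out = segment_labels_py_alt labels
instance (labels : List String) (out : List Int) : Decidable (Spec_segment_labels_py labels out) := by unfold Spec_segment_labels_py; infer_instance

-- ===== CLAIM =====
def Claim_equal_segment_labels_py : Prop := ∀ (labels : List String), Dom_segment_labels_py labels → Spec_segment_labels_py labels (segment_labels_py labels)

-- ===== LEMMAS AND PROOFS =====
theorem segALoop_eq_accumB (xs : List String) : ∀ (p : String) (c : Int),
    segALoop xs c (some p) =
      accumB c (List.zipWith (fun a b => if a ≠ b then (1 : Int) else 0) xs (p :: xs)) := by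
  induction xs with
  | nil => intro p c; simp [segALoop, accumB]
  | cons y ys ih =>
    intro p c
    simp only [segALoop, List.zipWith, accumB]
    by_cases h : y = p
    · subst h
      simp [ih y c]
    · simp [h, ih y (c + 1)]

-- ===== VERDICT =====
theorem segment_labels_py_spec : Claim_equal_segment_labels_py := by
  intro labels _
  unfold Spec_segment_labels_py segment_labels_py segment_labels_py_alt
  cases labels with
  | nil => simp [segALoop]
  | cons x xs =>
    simp only [segALoop, accumB]
    simp only [ne_eq, reduceCtorEq, not_false_iff, if_pos, zero_add]
    rw [segALoop_eq_accumB xs x 1]
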